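-- pv_equiv track=rewrite | github.com/malocas147/4cups-5 | add_one_la.py | build_marquee
-- ===== SOURCE A (Python) =====
-- def build_marquee(partners_list, css_class):
--     content = f'<div class="{css_class}">\n'
--     for _ in range(3):
--         for name, img_file in partners_list:
--             content += f'''                    <div
--                         class="flex-shrink-0 w-48 h-24 bg-background border border-border rounded-xl shadow-sm flex items-center justify-center p-4">
--                         <img src="assets/{img_file}" alt="Logo {name}"
--                             class="max-w-full max-h-full object-contain transition-all duration-300">
--                     </div>\n'''
--     content += '                </div>'
--     return content
-- ===== SOURCE B (Python) =====
-- def build_marquee(partners_list, css_class):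
--     # Single recursive descent with a repetition countdown: builds the string
--     # right-associated (each call prepends one block), no accumulator, no loop.
--     def rec(k, items):
--         if k == 0:
--             return '                </div>'
--         if not items:
--             return rec(k - 1, partners_list)
--         name, img_file = items[0]
--         return f'''                    <div
--                         class="flex-shrink-0 w-48 h-24 bg-background border border-border rounded-xl shadow-sm flex items-center justify-center p-4">
--                         <img src="assets/{img_file}" alt="Logo {name}"
--                             class="max-w-full max-h-full object-contain transition-all duration-300">
--                     </div>\n''' + rec(k, items[1:])
--     return f'<div class="{css_class}">\n' + rec(3, partners_list)
-- ===== Notes on version B (the rewrite author's own statement) =====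
-- stated objective: alternative
-- what changed: Replaces A's nested range(3)/inner-for loops with += accumulation by a single recursive descent carrying a repetition countdown and the remaining items, prepending one block per call (right-associated construction, no accumulator, no loops); it trades A's accumulator loop for recursion and is not faster.
import Mathlib
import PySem

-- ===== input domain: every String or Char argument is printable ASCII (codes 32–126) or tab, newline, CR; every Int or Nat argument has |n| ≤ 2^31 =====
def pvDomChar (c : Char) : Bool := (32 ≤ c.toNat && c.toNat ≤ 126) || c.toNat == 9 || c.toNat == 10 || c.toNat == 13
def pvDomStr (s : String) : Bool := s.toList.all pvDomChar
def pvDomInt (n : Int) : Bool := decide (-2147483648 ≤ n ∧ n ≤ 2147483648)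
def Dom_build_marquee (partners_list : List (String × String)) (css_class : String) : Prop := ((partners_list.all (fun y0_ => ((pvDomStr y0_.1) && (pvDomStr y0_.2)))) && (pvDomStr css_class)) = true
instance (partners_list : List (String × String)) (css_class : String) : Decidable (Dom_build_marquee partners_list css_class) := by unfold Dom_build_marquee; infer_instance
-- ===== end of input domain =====

-- B replaces A's nested loops + accumulator by one recursive descent with a repetition countdown, prepending blocks right-associated (objective: alternative).

-- the per-partner block, byte-for-byte the f-string of both Pythons
def pvBlock (name img_file : String) : String :=
  "                    <div\n                        class=\"flex-shrink-0 w-48 h-24 bg-background border border-border rounded-xl shadow-sm flex items-center justify-center p-4\">\n                        <img src=\"assets/" ++ img_file ++ "\" alt=\"Logo " ++ name ++ "\"\n                            class=\"max-w-full max-h-full object-contain transition-all duration-300\">\n                    </div>\n"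

-- ===== PORT A =====
def build_marquee (partners_list : List (String × String)) (css_class : String) : String :=
  let content := "<div class=\"" ++ css_class ++ "\">\n"
  let content := (PySem.List.pyRange 0 3 1).foldl
    (fun c _ => partners_list.foldl (fun c p => c ++ pvBlock p.1 p.2) c) content
  content ++ "                </div>"

-- ===== PORT B =====
-- rec(k, items) of Source B: countdown k (only ever 3 → 0, so Nat is exact) and remaining items
def pvRec (partners_list : List (String × String)) : Nat → List (String × String) → String
  | 0, _ => "                </div>"
  | k + 1, [] => pvRec partners_list k partners_list
  | k + 1, (name, img_file) :: rest => pvBlock name img_file ++ pvRec partners_list (k + 1) rest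
  termination_by k items => (k, items.length)

def build_marquee_alt (partners_list : List (String × String)) (css_class : String) : String :=
  "<div class=\"" ++ css_class ++ "\">\n" ++ pvRec partners_list 3 partners_list

-- ===== PRECONDITION & SPEC =====
def Spec_build_marquee (partners_list : List (String × String)) (css_class : String) (out : String) : Prop := out = build_marquee_alt partners_list css_class
instance (partners_list : List (String × String)) (css_class : String) (out : String) : Decidable (Spec_build_marquee partners_list css_class out) := by unfold Spec_build_marquee; infer_instance

-- ===== CLAIM =====
def Claim_equal_build_marquee : Prop := ∀ (partners_list : List (String × String)) (css_class : String), Dom_build_marquee partners_list css_class → Spec_build_marquee partners_list css_class (build_marquee partners_list css_class)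

-- ===== LEMMAS AND PROOFS =====
set_option maxRecDepth 100000
theorem foldl_append_out {α : Type} (f : α → String) (l : List α) (s : String) :
    l.foldl (fun c p => c ++ f p) s = s ++ l.foldl (fun c p => c ++ f p) "" := by
  induction l generalizing s with
  | nil => simp
  | cons a t ih =>
      simp only [List.foldl_cons]
      rw [ih (s ++ f a), ih ("" ++ f a)]
      simp [String.append_assoc]

-- one round of B's recursion peels off exactly the fold of one pass of A's inner loop
theorem pvRec_succ (pl : List (String × String)) (k : Nat) (items : List (String × String)) :
    pvRec pl (k + 1) items
      = items.foldl (fun c p => c ++ pvBlock p.1 p.2) "" ++ pvRec pl k pl := by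
  induction items with
  | nil => rw [List.foldl_nil, String.empty_append, pvRec.eq_def]
  | cons a t ih =>
      obtain ⟨name, img⟩ := a
      rw [pvRec.eq_def]
      show pvBlock name img ++ pvRec pl (k + 1) t = _
      rw [ih, List.foldl_cons, String.empty_append,
        foldl_append_out _ t (pvBlock name img), String.append_assoc]

-- ===== VERDICT =====
theorem build_marquee_spec : Claim_equal_build_marquee := by
  intro pl css _
  unfold Spec_build_marquee build_marquee build_marquee_alt
  rw [show PySem.List.pyRange 0 3 1 = [0, 1, 2] from by decide]
  simp only [List.foldl_cons, List.foldl_nil]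
  rw [pvRec_succ, pvRec_succ, pvRec_succ, pvRec.eq_def]
  have h := foldl_append_out (fun p => pvBlock p.1 p.2) pl
  rw [h, h, h]
  simp only [String.append_assoc]
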